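-- pv_equiv track=rewrite | github.com/Konohana0608/SAR-Pattern-Validation | src/sar_pattern_validation/measurement_validation_report.py | _expand_rerun_targets
-- ===== SOURCE A (Python) =====
-- def _expand_rerun_targets(targets: set[str], expected_groups: set[str]) -> set[str]:
--     expanded = set()
--     for target in targets:
--         if target in expected_groups:
--             expanded.add(target)
--             continue
--         expanded.update(
--             group for group in expected_groups if group.startswith(f"{target}_")
--         )
--     return expanded
-- ===== SOURCE B (Python) =====
-- def _expand_rerun_targets(targets: set[str], expected_groups: set[str]) -> set[str]:
--     # Build once: map each underscore-boundary prefix -> groups having it,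
--     # then answer each target by one dictionary lookup (no rescan of groups).
--     pairs = [
--         (group[:i], group)
--         for group in expected_groups
--         for i, ch in enumerate(group)
--         if ch == "_"
--     ]
--     prefix_index = {}
--     for prefix, group in pairs:
--         prefix_index.setdefault(prefix, []).append(group)
--     expanded = set()
--     for target in targets:
--         if target in expected_groups:
--             expanded.add(target)
--         else:
--             expanded.update(prefix_index.get(target, []))
--     return expanded
-- ===== Notes on version B (the rewrite author's own statement) =====
-- stated objective: faster
-- what changed: B builds a prefix index (dict from each underscore-boundary prefix of a group to the groups having it) in one pass over expected_groups, then answers each target by a single dictionary lookup, eliminating A's per-target rescan of expected_groups.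
import Mathlib
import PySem

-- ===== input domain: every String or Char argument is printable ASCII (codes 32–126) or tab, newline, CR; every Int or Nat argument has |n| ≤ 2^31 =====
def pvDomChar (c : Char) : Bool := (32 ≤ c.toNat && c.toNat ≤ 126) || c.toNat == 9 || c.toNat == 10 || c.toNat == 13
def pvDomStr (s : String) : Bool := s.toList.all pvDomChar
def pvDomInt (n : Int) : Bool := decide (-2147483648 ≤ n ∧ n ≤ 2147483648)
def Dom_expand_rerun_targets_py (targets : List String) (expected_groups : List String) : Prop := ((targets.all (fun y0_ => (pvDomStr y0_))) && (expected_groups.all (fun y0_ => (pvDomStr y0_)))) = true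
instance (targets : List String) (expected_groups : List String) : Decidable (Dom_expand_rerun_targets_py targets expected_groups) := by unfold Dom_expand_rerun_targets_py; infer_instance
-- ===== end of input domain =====

-- B answers each target by one lookup in a prefix index built once from expected_groups, instead of A's rescan of expected_groups per target; same return value.


-- ===== PORT A =====
def expand_rerun_targets_py (targets : List String) (expected_groups : List String) : List String :=
  targets.foldl (fun expanded target =>
    if expected_groups.contains target then
      PySem.Set.add expanded target
    else
      expected_groups.foldl (fun e group =>
        if PySem.Str.startswith group (target ++ "_") then PySem.Set.add e group else e) expanded)
    PySem.Set.empty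

-- ===== PORT B =====
def expand_rerun_targets_py_alt (targets : List String) (expected_groups : List String) : List String :=
  let pairs : List (String × String) := expected_groups.flatMap (fun group =>
    ((PySem.List.enumerate group.toList 0).filter (fun p => p.2 == '_')).map
      (fun p => (PySem.Str.slice group none (some p.1), group)))
  let prefix_index : PySem.Dict String (List String) :=
    pairs.foldl (fun d p => d.modify p.1 [] (· ++ [p.2])) PySem.Dict.empty
  targets.foldl (fun expanded target =>
    if expected_groups.contains target then
      PySem.Set.add expanded target
    else
      PySem.Set.update expanded (prefix_index.getD target []))
    PySem.Set.empty

-- ===== PRECONDITION & SPEC =====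
def Spec_expand_rerun_targets_py (targets : List String) (expected_groups : List String) (out : List String) : Prop := out = expand_rerun_targets_py_alt targets expected_groups
instance (targets : List String) (expected_groups : List String) (out : List String) : Decidable (Spec_expand_rerun_targets_py targets expected_groups out) := by unfold Spec_expand_rerun_targets_py; infer_instance

-- ===== CLAIM (what is proved, stated in full; the proofs are below) =====
def Claim_equal_expand_rerun_targets_py : Prop := ∀ (targets : List String) (expected_groups : List String), Dom_expand_rerun_targets_py targets expected_groups → Spec_expand_rerun_targets_py targets expected_groups (expand_rerun_targets_py targets expected_groups)

-- ===== LEMMAS AND PROOFS =====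

-- A's test group.startswith(target + "_"), at List Char level
theorem startswith_underscore_iff (g t : String) :
    PySem.Str.startswith g (t ++ "_") = true ↔ t.toList ++ ['_'] <+: g.toList := by
  rw [← PySem.Chars.startswith_iff]
  simp [PySem.Str.startswith]

-- B's key group[:i] equals t iff t is the first i characters of group
theorem slice_eq_take (g t : String) (n : Nat) :
    (PySem.Str.slice g none (some ((n : Nat) : Int)) == t) = true ↔ g.toList.take n = t.toList := by
  rw [beq_iff_eq]
  constructor
  · intro h; rw [← h]; simp [PySem.Str.toList_slice, PySem.List.slice_to_natCast]
  · intro h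
    have : (PySem.Str.slice g none (some ((n : Nat) : Int))).toList = t.toList := by
      simp [PySem.Str.toList_slice, PySem.List.slice_to_natCast, h]
    exact String.toList_injective this

-- per group: among the underscore positions of g, exactly one yields the key t, and it exists iff t++'_' prefixes g
theorem enum_pref (g t : String) : ∀ (cs : List Char) (n : Nat), cs = g.toList.drop n →
    (((PySem.List.enumerate cs (n : Int)).filter (fun p => p.2 == '_')).filter
        (fun p => PySem.Str.slice g none (some p.1) == t)).map (fun _ => g)
      = if n ≤ t.toList.length ∧ t.toList ++ ['_'] <+: g.toList then [g] else [] := by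
  intro cs
  induction cs with
  | nil =>
    intro n h
    have hlen : g.toList.length ≤ n := by
      have := congrArg List.length h
      simp only [List.length_nil, List.length_drop] at this; omega
    rw [if_neg]
    · simp
    · rintro ⟨h1, h2⟩
      have h3 := h2.length_le
      simp only [List.length_append, List.length_cons, List.length_nil] at h3; omega
  | cons c cs' ih =>
    intro n h
    have hlt : n < g.toList.length := by
      have := congrArg List.length h
      simp only [List.length_cons, List.length_drop] at this; omega
    have hdrop : g.toList.drop n = g.toList[n] :: g.toList.drop (n + 1) :=
      List.drop_eq_getElem_cons hlt
    rw [hdrop] at h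
    obtain ⟨hc, hcs'⟩ := List.cons_eq_cons.mp h
    have htail := ih (n + 1) hcs'
    have hcast : (n : Int) + 1 = ((n + 1 : Nat) : Int) := by push_cast; ring
    rw [PySem.List.enumerate_cons, hcast]
    by_cases hpass : g.toList[n] = '_' ∧ g.toList.take n = t.toList
    · -- head passes both filters
      have hn : n = t.toList.length := by
        have := congrArg List.length hpass.2
        simp only [List.length_take] at this; omega
      have hpre : t.toList ++ ['_'] <+: g.toList := by
        refine ⟨g.toList.drop (n + 1), ?_⟩
        rw [← hpass.2, ← hpass.1, ← hc]
        rw [List.append_assoc]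
        have : [c] ++ g.toList.drop (n+1) = g.toList.drop n := by rw [hdrop, hc]; rfl
        rw [this, List.take_append_drop]
      rw [List.filter_cons_of_pos, List.filter_cons_of_pos]
      · rw [List.map_cons, htail, if_neg (by rintro ⟨h1, _⟩; omega),
          if_pos ⟨by omega, hpre⟩]
      · exact (slice_eq_take g t n).mpr hpass.2
      · simp [hc, hpass.1]
    · -- head fails at least one filter
      have hns : ¬ (n = t.toList.length ∧ t.toList ++ ['_'] <+: g.toList) := by
        rintro ⟨hn, hpre⟩
        apply hpass
        have htake : g.toList.take (n + 1) = t.toList ++ ['_'] := by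
          have h4 := (List.prefix_iff_eq_take.mp hpre).symm
          simp only [List.length_append, List.length_cons, List.length_nil] at h4
          rw [show t.toList.length + 1 = n + 1 by omega] at h4
          exact h4
        have htake' : g.toList.take (n + 1) = g.toList.take n ++ [g.toList[n]] := by
          rw [List.take_add_one]
          simp only [List.getElem?_eq_getElem hlt, Option.toList_some]
        have h2 : g.toList.take n ++ [g.toList[n]] = t.toList ++ ['_'] := by rw [← htake', htake]
        have hlen2 : (g.toList.take n).length = t.toList.length := by simp only [List.length_take]; omega
        have := List.append_inj h2 (by simpa using hlen2)
        refine ⟨by simpa using this.2, this.1⟩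
      have hdrophead :
          (((((n : Int)), c) :: PySem.List.enumerate cs' ((n+1 : Nat) : Int)).filter (fun p => p.2 == '_')).filter
            (fun p => PySem.Str.slice g none (some p.1) == t)
          = ((PySem.List.enumerate cs' ((n+1 : Nat) : Int)).filter (fun p => p.2 == '_')).filter
            (fun p => PySem.Str.slice g none (some p.1) == t) := by
        by_cases h1 : (c == '_') = true
        · by_cases h2 : (PySem.Str.slice g none (some ((n : Nat) : Int)) == t) = true
          · exact absurd ⟨hc ▸ (beq_iff_eq.mp h1), (slice_eq_take g t n).mp h2⟩ hpass
          · simp [h1, h2]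
        · simp [h1]
      rw [hdrophead, htail]
      by_cases hcond : n ≤ t.toList.length ∧ t.toList ++ ['_'] <+: g.toList
      · have : n + 1 ≤ t.toList.length := by
          rcases Nat.lt_or_ge n t.toList.length with hlt2 | hge
          · omega
          · exact absurd ⟨by omega, hcond.2⟩ hns
        rw [if_pos ⟨this, hcond.2⟩, if_pos hcond]
      · rw [if_neg (by rintro ⟨h1, h2⟩; exact hcond ⟨by omega, h2⟩), if_neg hcond]

-- B's prefix index looks up exactly the groups A's inner scan collects, in the same order
theorem index_getD (expected_groups : List String) (t : String) :
    ((expected_groups.flatMap (fun group =>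
        ((PySem.List.enumerate group.toList 0).filter (fun p => p.2 == '_')).map
          (fun p => (PySem.Str.slice group none (some p.1), group)))).foldl
        (fun d p => d.modify p.1 [] (· ++ [p.2])) PySem.Dict.empty).getD t []
      = expected_groups.filter (fun g => PySem.Str.startswith g (t ++ "_")) := by
  rw [PySem.Dict.getD_foldl_modify_append]
  rw [PySem.Dict.getD_empty, List.nil_append]
  induction expected_groups with
  | nil => simp
  | cons g gs ih =>
    have hhead : List.map (fun x => x.2) (List.filter (fun p => p.1 == t)
        ((List.filter (fun p => p.2 == '_') (PySem.List.enumerate g.toList 0)).map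
          (fun p => (PySem.Str.slice g none (some p.1), g))))
        = if t.toList ++ ['_'] <+: g.toList then [g] else [] := by
      rw [List.filter_map, List.map_map]
      have h0 := enum_pref g t g.toList 0 (by simp)
      simp only [Nat.cast_zero, Nat.zero_le, true_and] at h0
      exact h0
    rw [List.flatMap_cons, List.filter_append, List.map_append, ih, List.filter_cons, hhead]
    by_cases hs : PySem.Str.startswith g (t ++ "_") = true
    · rw [if_pos ((startswith_underscore_iff g t).mp hs), if_pos hs, List.singleton_append]
    · rw [if_neg (fun h2 => hs ((startswith_underscore_iff g t).mpr h2)), if_neg hs, List.nil_append]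

-- folding add over a filtered list = the conditional-add loop
theorem foldl_add_filter {α : Type} [BEq α] (l : List α) (P : α → Bool) (e : List α) :
    (l.filter P).foldl PySem.Set.add e = l.foldl (fun e g => if P g then PySem.Set.add e g else e) e := by
  induction l generalizing e with
  | nil => rfl
  | cons x xs ih =>
    by_cases h : P x <;> simp [h, ih]

-- ===== VERDICT (by name: the statement is the Claim_ definition above) =====
theorem expand_rerun_targets_py_spec : Claim_equal_expand_rerun_targets_py := by
  intro targets expected_groups _
  unfold Spec_expand_rerun_targets_py expand_rerun_targets_py expand_rerun_targets_py_alt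
  apply PySem.List.foldl_congr_mem
  intro acc target _
  by_cases h : expected_groups.contains target
  · rw [if_pos h, if_pos h]
  · rw [if_neg h, if_neg h, index_getD expected_groups target]
    rw [show ∀ (s xs : List String), PySem.Set.update s xs = xs.foldl PySem.Set.add s from fun _ _ => rfl]
    exact (foldl_add_filter _ _ _).symm
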